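-- pv_equiv track=rewrite | github.com/nlp-yfguo/trans_distill_2024524 | tools/phrase/seg.py | adv_strip
-- ===== SOURCE A (Python) =====
-- def adv_strip(strin):
--
-- 	ct = 0
-- 	for tmp in strin:
-- 		if tmp == " ":
-- 			ct += 1
-- 		else:
-- 			break
-- 	return ct // 2, strin.strip()
-- ===== SOURCE B (Python) =====
-- def adv_strip(strin):
-- 	# count complete leading space PAIRS directly: consume two spaces per step,
-- 	# so no division is needed; then strip.
-- 	k = 0
-- 	while strin[2 * k : 2 * k + 2] == "  ":
-- 		k += 1
-- 	return k, strin.strip()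
-- ===== Notes on version B (the rewrite author's own statement) =====
-- stated objective: alternative
-- what changed: Instead of counting single leading spaces and halving, B consumes the prefix two characters at a time, counting complete space pairs directly via step-2 slice comparisons, so the // 2 disappears.
import Mathlib
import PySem

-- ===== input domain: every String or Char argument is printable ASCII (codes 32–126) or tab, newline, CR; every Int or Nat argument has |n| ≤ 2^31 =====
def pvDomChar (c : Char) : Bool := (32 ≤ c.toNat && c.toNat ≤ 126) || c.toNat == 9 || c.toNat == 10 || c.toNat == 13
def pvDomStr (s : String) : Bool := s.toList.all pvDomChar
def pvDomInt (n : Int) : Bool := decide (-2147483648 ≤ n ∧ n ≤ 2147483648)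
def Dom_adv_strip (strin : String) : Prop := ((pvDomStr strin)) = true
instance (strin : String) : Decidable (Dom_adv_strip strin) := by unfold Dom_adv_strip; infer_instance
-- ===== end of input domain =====

-- B counts complete leading space pairs directly by consuming two characters per step (no // 2); alternative decomposition, same cost.


-- ===== PORT A =====
-- the for-loop with break: count leading ' ' characters, stop at the first non-space
def advCountLoop : List Char → Int
  | [] => 0
  | c :: rest => if c == ' ' then 1 + advCountLoop rest else 0

def adv_strip (strin : String) : Int × String :=
  (PySem.Int.floordiv (advCountLoop strin.toList) 2, PySem.Str.strip strin)

-- ===== PORT B =====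
-- the while loop 'while strin[2k:2k+2] == "  ": k += 1': each step checks the next
-- two-character window and consumes it; counts complete space pairs directly
def pairLoop : List Char → Int
  | ' ' :: ' ' :: rest => 1 + pairLoop rest
  | _ => 0

def adv_strip_alt (strin : String) : Int × String :=
  (pairLoop strin.toList, PySem.Str.strip strin)

-- ===== PRECONDITION & SPEC =====
def Spec_adv_strip (strin : String) (out : Int × String) : Prop := out = adv_strip_alt strin
instance (strin : String) (out : Int × String) : Decidable (Spec_adv_strip strin out) := by unfold Spec_adv_strip; infer_instance

-- ===== CLAIM (what is proved, stated in full; the proofs are below) =====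
def Claim_equal_adv_strip : Prop := ∀ (strin : String), Dom_adv_strip strin → Spec_adv_strip strin (adv_strip strin)

-- ===== LEMMAS AND PROOFS =====
theorem advCountLoop_nonneg (l : List Char) : 0 ≤ advCountLoop l := by
  induction l with
  | nil => simp [advCountLoop]
  | cons c rest ih => by_cases h : c = ' ' <;> simp [advCountLoop, h] <;> omega

theorem pairLoop_eq_zero (c1 c2 : Char) (rest : List Char)
    (h : ¬ (c1 = ' ' ∧ c2 = ' ')) : pairLoop (c1 :: c2 :: rest) = 0 := by
  rw [pairLoop.eq_def]
  split
  · rename_i heq; injection heq with h1 heq; injection heq with h2 _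
    exact absurd ⟨h1, h2⟩ h
  · rfl

theorem halved_eq_pairLoop (l : List Char) :
    PySem.Int.floordiv (advCountLoop l) 2 = pairLoop l := by
  induction l using pairLoop.induct with
  | case1 rest ih =>
    have h2 : advCountLoop (' ' :: ' ' :: rest) = 2 + advCountLoop rest := by
      simp [advCountLoop]; ring
    have hpos : (0:Int) < 2 := by omega
    have hnn := advCountLoop_nonneg rest
    rw [h2, pairLoop]
    rw [PySem.Int.floordiv_eq_ediv_of_pos hpos] at *
    omega
  | case2 l h1 =>
    -- l does not start with two spaces: advCountLoop l ∈ {0, 1}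
    match l, h1 with
    | [], _ => simp [advCountLoop, pairLoop, PySem.Int.floordiv]
    | [c], _ =>
      by_cases h : c = ' ' <;>
        simp [advCountLoop, pairLoop, h, PySem.Int.floordiv]
    | c1 :: c2 :: rest, h1 =>
      have hne : ¬ (c1 = ' ' ∧ c2 = ' ') := by
        intro ⟨ha, hb⟩; exact h1 rest (by rw [ha, hb])
      rw [pairLoop_eq_zero c1 c2 rest hne]
      by_cases ha : c1 = ' '
      · have hb : c2 ≠ ' ' := fun hb => hne ⟨ha, hb⟩
        have hb' : (c2 == ' ') = false := by simp [hb]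
        simp [advCountLoop, ha, hb', PySem.Int.floordiv]
      · have ha' : (c1 == ' ') = false := by simp [ha]
        simp [advCountLoop, ha', PySem.Int.floordiv]

-- ===== VERDICT (by name: the statement is the Claim_ definition above) =====
theorem adv_strip_spec : Claim_equal_adv_strip := by
  intro strin _
  unfold Spec_adv_strip adv_strip adv_strip_alt
  rw [halved_eq_pairLoop]
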